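-- pv_equiv track=rewrite | github.com/George-Sucuzhanay/fall-2021-127-work-George-Sucuzhanay | hw-05-lists/chapter10.py | sumUntilEven
-- ===== SOURCE A (Python) =====
-- def sumUntilEven(listNum):
--     sumCount = 0
--     for i in listNum:
--         if i % 2 != 0:
--             sumCount += i
--         else:
--             return sumCount
--     return sumCount
-- ===== SOURCE B (Python) =====
-- def sumUntilEven(listNum):
--     # Stage 1: locate the cut point (index of the first even element), no summing here.
--     cut = len(listNum)
--     for idx, v in enumerate(listNum):
--         if v % 2 == 0:
--             cut = idx
--             break
--     # Stage 2: sum the prefix before the cut in a separate pass.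
--     return sum(listNum[:cut])
-- ===== Notes on version B (the rewrite author's own statement) =====
-- stated objective: alternative
-- what changed: A fuses scanning and summing with an accumulator and an early return; B maintains no running sum at all: it first searches for the index of the first even element (the cut point), then sums the prefix slice before it in a second pass.
import Mathlib
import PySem

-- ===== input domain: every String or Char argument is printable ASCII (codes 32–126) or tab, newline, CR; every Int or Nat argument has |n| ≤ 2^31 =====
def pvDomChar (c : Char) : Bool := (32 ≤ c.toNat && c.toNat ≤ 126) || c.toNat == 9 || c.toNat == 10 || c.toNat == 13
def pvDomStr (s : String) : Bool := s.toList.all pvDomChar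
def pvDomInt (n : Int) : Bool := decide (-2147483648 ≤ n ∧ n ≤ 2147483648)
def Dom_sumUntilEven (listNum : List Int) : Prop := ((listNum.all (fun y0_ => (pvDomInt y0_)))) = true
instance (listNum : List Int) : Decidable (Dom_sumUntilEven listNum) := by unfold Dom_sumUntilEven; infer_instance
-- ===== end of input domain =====

-- B replaces A's fused accumulate-and-early-return loop with two stages: find the cut
-- index of the first even element, then sum the prefix slice before it (alternative).

-- ===== PORT A =====
-- A: loop with a running sum, early return on the first even element.
def sumUntilEvenGo (sumCount : Int) : List Int → Int
  | [] => sumCount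
  | i :: rest =>
    if PySem.Int.mod i 2 ≠ 0 then sumUntilEvenGo (sumCount + i) rest
    else sumCount

def sumUntilEven (listNum : List Int) : Int := sumUntilEvenGo 0 listNum

-- ===== PORT B =====
-- B stage 1: index of the first even element (length if none); mirrors the
-- enumerate-and-break search, which keeps no running sum.
def cutIdx : List Int → Nat
  | [] => 0
  | v :: rest => if PySem.Int.mod v 2 = 0 then 0 else cutIdx rest + 1

-- B stage 2: listNum[:cut] with 0 ≤ cut is exactly List.take cut; sum is List.sum.
def sumUntilEven_alt (listNum : List Int) : Int :=
  (listNum.take (cutIdx listNum)).sum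

-- ===== PRECONDITION & SPEC =====
def Spec_sumUntilEven (listNum : List Int) (out : Int) : Prop := out = sumUntilEven_alt listNum
instance (listNum : List Int) (out : Int) : Decidable (Spec_sumUntilEven listNum out) := by unfold Spec_sumUntilEven; infer_instance

-- ===== CLAIM =====
def Claim_equal_sumUntilEven : Prop := ∀ (listNum : List Int), Dom_sumUntilEven listNum → Spec_sumUntilEven listNum (sumUntilEven listNum)

-- ===== LEMMAS AND PROOFS =====
theorem sumUntilEvenGo_eq (l : List Int) : ∀ (acc : Int),
    sumUntilEvenGo acc l = acc + (l.take (cutIdx l)).sum := by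
  induction l with
  | nil => intro acc; simp [sumUntilEvenGo, cutIdx]
  | cons i rest ih =>
    intro acc
    by_cases h : i.fmod 2 = 0
    · simp [sumUntilEvenGo, cutIdx, PySem.Int.mod, h]
    · simp [sumUntilEvenGo, cutIdx, PySem.Int.mod, h, ih, add_assoc]

-- ===== VERDICT =====
theorem sumUntilEven_spec : Claim_equal_sumUntilEven := by
  intro l _
  show _ = _
  simp [sumUntilEven, sumUntilEven_alt, sumUntilEvenGo_eq]
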